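-- pv_equiv track=rewrite | github.com/iizs/programming-challanges | codeforces/1721/1721C.py | able_to_fill
-- ===== SOURCE A (Python) =====
-- def able_to_fill(list_a, list_b, a, b):
--     a_skipped = False
--     b_skipped = False
--     a_idx = 0
--     b_idx = 0
--     while a_idx < len(list_a) and b_idx < len(list_b):
--         if not a_skipped and a == list_a[a_idx]:
--             a_idx += 1
--             a_skipped = True
--             continue
--         if not b_skipped and b == list_b[b_idx]:
--             b_idx += 1
--             b_skipped = True
--             continue
--         if list_a[a_idx] > list_b[b_idx]:
--             return False
--         a_idx += 1
--         b_idx += 1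
--     return True
-- ===== SOURCE B (Python) =====
-- def able_to_fill(list_a, list_b, a, b):
--     a_filtered = list(list_a)
--     b_filtered = list(list_b)
--     try:
--         a_filtered.remove(a)
--     except ValueError:
--         pass
--     try:
--         b_filtered.remove(b)
--     except ValueError:
--         pass
--     for x, y in zip(a_filtered, b_filtered):
--         if x > y:
--             return False
--     return True
-- ===== Notes on version B (the rewrite author's own statement) =====
-- stated objective: simpler
-- what changed: Replaces the interleaved skip-flag state machine (a_skipped/b_skipped flags, two indices, continue statements) by a filter-then-compare shape: remove the first occurrence of a and b from copies of the lists, then zip and compare pairwise.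
import Mathlib
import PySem

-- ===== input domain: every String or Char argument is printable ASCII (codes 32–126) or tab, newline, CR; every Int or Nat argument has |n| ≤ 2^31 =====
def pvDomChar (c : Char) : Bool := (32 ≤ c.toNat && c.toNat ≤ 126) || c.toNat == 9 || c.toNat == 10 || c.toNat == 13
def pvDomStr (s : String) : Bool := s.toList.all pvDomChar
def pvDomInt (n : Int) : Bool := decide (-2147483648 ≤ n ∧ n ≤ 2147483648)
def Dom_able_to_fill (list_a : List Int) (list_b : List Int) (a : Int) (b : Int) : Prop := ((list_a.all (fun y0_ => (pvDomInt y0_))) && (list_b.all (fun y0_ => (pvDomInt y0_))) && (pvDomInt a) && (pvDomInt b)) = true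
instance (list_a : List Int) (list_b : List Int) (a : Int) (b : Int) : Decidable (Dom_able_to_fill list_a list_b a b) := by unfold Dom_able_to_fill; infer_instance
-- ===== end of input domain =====

-- B replaces A's interleaved skip-flag loop by filter-then-zip-compare (objective: simpler).

-- ===== PORT A =====
-- A's while loop over (a_idx, b_idx, a_skipped, b_skipped), transcribed as structural
-- recursion over the two remaining suffixes (head = list[idx]); branches in A's order.
def ableLoopA (a : Int) (b : Int) : List Int → List Int → Bool → Bool → Bool
  | x :: xs, y :: ys, a_skipped, b_skipped =>
      if !a_skipped && a == x then
        ableLoopA a b xs (y :: ys) true b_skipped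
      else if !b_skipped && b == y then
        ableLoopA a b (x :: xs) ys a_skipped true
      else if x > y then
        false
      else
        ableLoopA a b xs ys a_skipped b_skipped
  | _, _, _, _ => true
  termination_by ra rb _ _ => ra.length + rb.length

def able_to_fill (list_a : List Int) (list_b : List Int) (a : Int) (b : Int) : Bool :=
  ableLoopA a b list_a list_b false false

-- ===== PORT B =====
-- list.remove(v) on a copy, with the ValueError swallowed: drop the first occurrence if any.
def ableRemoveFirst (v : Int) : List Int → List Int
  | [] => []
  | x :: xs => if x == v then xs else x :: ableRemoveFirst v xs

-- the 'for x, y in zip(...): if x > y: return False' loop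
def ableCmp : List Int → List Int → Bool
  | x :: xs, y :: ys => if x > y then false else ableCmp xs ys
  | _, _ => true

def able_to_fill_alt (list_a : List Int) (list_b : List Int) (a : Int) (b : Int) : Bool :=
  ableCmp (ableRemoveFirst a list_a) (ableRemoveFirst b list_b)

-- ===== PRECONDITION & SPEC =====
def Spec_able_to_fill (list_a : List Int) (list_b : List Int) (a : Int) (b : Int) (out : Bool) : Prop := out = able_to_fill_alt list_a list_b a b
instance (list_a : List Int) (list_b : List Int) (a : Int) (b : Int) (out : Bool) : Decidable (Spec_able_to_fill list_a list_b a b out) := by unfold Spec_able_to_fill; infer_instance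

-- ===== CLAIM (what is proved, stated in full; the proofs are below) =====
def Claim_equal_able_to_fill : Prop := ∀ (list_a : List Int) (list_b : List Int) (a : Int) (b : Int), Dom_able_to_fill list_a list_b a b → Spec_able_to_fill list_a list_b a b (able_to_fill list_a list_b a b)

-- ===== LEMMAS AND PROOFS =====

-- 'skip still pending' is the same as 'first occurrence not yet removed'
def ablePend (flag : Bool) (v : Int) (l : List Int) : List Int :=
  if flag then l else ableRemoveFirst v l

theorem ablePend_cons_a (as_ : Bool) (a x : Int) (xs : List Int)
    (h : (!as_ && a == x) = false) :
    ablePend as_ a (x :: xs) = x :: ablePend as_ a xs := by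
  cases as_ with
  | true => simp [ablePend]
  | false =>
      simp only [Bool.not_false, Bool.true_and] at h
      have hx : (x == a) = false := by
        simp only [beq_eq_false_iff_ne] at h ⊢; omega
      simp [ablePend, ableRemoveFirst, hx]

theorem ableLoopA_eq (a b : Int) :
    ∀ (ra rb : List Int) (as_ bs : Bool),
      ableLoopA a b ra rb as_ bs = ableCmp (ablePend as_ a ra) (ablePend bs b rb) := by
  intro ra rb
  induction ra generalizing rb with
  | nil =>
      intro as_ bs
      have h : ablePend as_ a ([] : List Int) = [] := by
        cases as_ <;> simp [ablePend, ableRemoveFirst]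
      simp [ableLoopA, h, ableCmp]
  | cons x xs ih =>
      induction rb with
      | nil =>
          intro as_ bs
          have h : ablePend bs b ([] : List Int) = [] := by
            cases bs <;> simp [ablePend, ableRemoveFirst]
          rw [h]
          cases ablePend as_ a (x :: xs) <;> simp [ableLoopA, ableCmp]
      | cons y ys ihb =>
          intro as_ bs
          rw [ableLoopA]
          by_cases hax : (!as_ && a == x) = true
          · -- a-skip branch: as_ = false and x = a
            obtain ⟨h1, h2⟩ := (Bool.and_eq_true _ _).mp hax
            have has : as_ = false := by cases as_ <;> simp_all
            have hxa : (x == a) = true := by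
              have := beq_iff_eq.mp h2; simp [this]
            rw [if_pos hax, ih (y :: ys) true bs]
            simp [ablePend, has, ableRemoveFirst, hxa]
          · rw [if_neg hax]
            have hax' : (!as_ && a == x) = false := by
              cases hh : (!as_ && a == x) <;> simp_all
            by_cases hby : (!bs && b == y) = true
            · -- b-skip branch: bs = false and y = b
              obtain ⟨h1, h2⟩ := (Bool.and_eq_true _ _).mp hby
              have hbs : bs = false := by cases bs <;> simp_all
              have hyb : (y == b) = true := by
                have := beq_iff_eq.mp h2; simp [this]
              rw [if_pos hby, ihb as_ true]
              simp [ablePend, hbs, ableRemoveFirst, hyb]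
            · -- compare branch
              have hby' : (!bs && b == y) = false := by
                cases hh : (!bs && b == y) <;> simp_all
              rw [if_neg hby,
                  ablePend_cons_a as_ a x xs hax',
                  ablePend_cons_a bs b y ys hby']
              rw [ableCmp]
              by_cases hxy : x > y
              · simp [hxy]
              · simp [hxy, ih ys as_ bs]

-- ===== VERDICT (by name: the statement is the Claim_ definition above) =====
theorem able_to_fill_spec : Claim_equal_able_to_fill := by
  intro la lb a b _
  unfold Spec_able_to_fill able_to_fill able_to_fill_alt
  rw [ableLoopA_eq]
  simp [ablePend]
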